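-- pv_equiv track=rewrite | github.com/neo-project/neo-devpack-dotnet | update_analyzer_tests.py | simplify_analyzer_test
-- ===== SOURCE A (Python) =====
-- def simplify_analyzer_test(test_method):
--     """Simplify an analyzer test by removing complex compiler error expectations."""
--     lines = test_method.split('\n')
--
--     # Find the test setup
--     new_lines = []
--     in_expected_diagnostics = False
--
--     for line in lines:
--         if 'test.ExpectedDiagnostics.Add(' in line and 'CompilerError' in line:
--             # Skip compiler error expectations
--             in_expected_diagnostics = True
--             continue
--         elif 'test.ExpectedDiagnostics.Add(' in line and 'DiagnosticResult(' in line: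
--             # Keep analyzer diagnostic expectations
--             new_lines.append(line)
--             in_expected_diagnostics = False
--         elif in_expected_diagnostics:
--             # Skip lines that are part of compiler error expectations
--             continue
--         else:
--             new_lines.append(line)
--             in_expected_diagnostics = False
--
--     return '\n'.join(new_lines)
-- ===== SOURCE B (Python) =====
-- def simplify_analyzer_test(test_method):
--     """Simplify an analyzer test by removing complex compiler error expectations."""
--     lines = test_method.split('\n')
--     out = []
--     i, n = 0, len(lines)
--     while i < n:
--         line = lines[i]
--         if 'test.ExpectedDiagnostics.Add(' in line and 'CompilerError' in line:
--             # skip this line and everything up to (not including) the next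
--             # kept DiagnosticResult expectation line
--             i += 1
--             while i < n:
--                 nxt = lines[i]
--                 if ('test.ExpectedDiagnostics.Add(' in nxt
--                         and 'DiagnosticResult(' in nxt
--                         and 'CompilerError' not in nxt):
--                     break
--                 i += 1
--         else:
--             out.append(line)
--             i += 1
--     return '\n'.join(out)
-- ===== Notes on version B (the rewrite author's own statement) =====
-- stated objective: alternative
-- what changed: Replaced A's boolean in_expected_diagnostics flag state machine (one branch chain consulted on every line) with an explicit index walk: on hitting a CompilerError expectation line an inner loop skips forward until the next kept DiagnosticResult line, so the kept lines are appended by a flag-free outer loop.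
import Mathlib
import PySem

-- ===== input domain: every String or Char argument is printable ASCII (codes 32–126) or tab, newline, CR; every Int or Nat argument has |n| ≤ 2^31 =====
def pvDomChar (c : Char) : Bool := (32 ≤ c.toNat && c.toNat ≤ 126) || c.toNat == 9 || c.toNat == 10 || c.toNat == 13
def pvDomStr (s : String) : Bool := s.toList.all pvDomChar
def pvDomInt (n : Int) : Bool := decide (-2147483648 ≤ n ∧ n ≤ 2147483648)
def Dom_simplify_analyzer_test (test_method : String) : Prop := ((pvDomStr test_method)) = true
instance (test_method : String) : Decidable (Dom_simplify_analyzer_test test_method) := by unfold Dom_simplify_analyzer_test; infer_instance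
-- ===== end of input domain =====

-- B replaces A's boolean skip-flag state machine by an explicit inner skip loop over an index
-- (objective: alternative decomposition, same O(n) cost).

-- line-classification helpers shared by both ports (each Python writes these tests inline)
def pvIsCE (line : String) : Bool :=
  PySem.Str.isIn "test.ExpectedDiagnostics.Add(" line && PySem.Str.isIn "CompilerError" line

def pvIsDR (line : String) : Bool :=
  PySem.Str.isIn "test.ExpectedDiagnostics.Add(" line && PySem.Str.isIn "DiagnosticResult(" line

-- ===== PORT A =====
-- for-loop over the lines carrying (new_lines, in_expected_diagnostics), branches in A's order
def simplify_analyzer_test (test_method : String) : String :=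
  -- '\n' is a nonempty separator, so split? is always some; .getD [] only discharges the Option
  let lines := (PySem.Str.split? test_method "\n").getD []
  let st := lines.foldl (fun (st : List String × Bool) line =>
    if pvIsCE line then (st.1, true)
    else if pvIsDR line then (st.1 ++ [line], false)
    else if st.2 then (st.1, true)
    else (st.1 ++ [line], false)) ([], false)
  PySem.Str.join "\n" st.1

-- ===== PORT B =====
-- inner while loop: advance past lines until the next kept DiagnosticResult line (or end)
def pvSkipB : List String → List String
  | [] => []
  | l :: ls => if pvIsDR l && !pvIsCE l then l :: ls else pvSkipB ls

theorem pvSkipB_length_le (ls : List String) : (pvSkipB ls).length ≤ ls.length := by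
  induction ls with
  | nil => simp [pvSkipB]
  | cons l ls ih =>
    simp only [pvSkipB]
    split
    · simp
    · exact Nat.le_trans ih (by simp)

-- outer while loop: keep the line unless it is a CompilerError expectation, then skip
def pvGoB : List String → List String
  | [] => []
  | l :: ls => if pvIsCE l then pvGoB (pvSkipB ls) else l :: pvGoB ls
  termination_by ls => ls.length
  decreasing_by
  · exact Nat.lt_succ_of_le (pvSkipB_length_le ls)
  · simp

def simplify_analyzer_test_alt (test_method : String) : String :=
  PySem.Str.join "\n" (pvGoB ((PySem.Str.split? test_method "\n").getD []))

-- ===== PRECONDITION & SPEC =====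
def Spec_simplify_analyzer_test (test_method : String) (out : String) : Prop := out = simplify_analyzer_test_alt test_method
instance (test_method : String) (out : String) : Decidable (Spec_simplify_analyzer_test test_method out) := by unfold Spec_simplify_analyzer_test; infer_instance

-- ===== CLAIM (what is proved, stated in full; the proofs are below) =====
def Claim_equal_simplify_analyzer_test : Prop := ∀ (test_method : String), Dom_simplify_analyzer_test test_method → Spec_simplify_analyzer_test test_method (simplify_analyzer_test test_method)

-- ===== LEMMAS AND PROOFS =====

-- A's loop body as a recursion producing just the kept lines, given the incoming flag
def pvGoA : List String → Bool → List String
  | [], _ => []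
  | l :: ls, fl =>
    if pvIsCE l then pvGoA ls true
    else if pvIsDR l then l :: pvGoA ls false
    else if fl then pvGoA ls true
    else l :: pvGoA ls false

theorem pvFoldA_eq_goA (lines : List String) (acc : List String) (fl : Bool) :
    (lines.foldl (fun (st : List String × Bool) line =>
      if pvIsCE line then (st.1, true)
      else if pvIsDR line then (st.1 ++ [line], false)
      else if st.2 then (st.1, true)
      else (st.1 ++ [line], false)) (acc, fl)).1 = acc ++ pvGoA lines fl := by
  induction lines generalizing acc fl with
  | nil => simp [pvGoA]
  | cons l ls ih =>
    simp only [List.foldl_cons, pvGoA]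
    by_cases h1 : pvIsCE l = true
    · simp [h1, ih]
    · by_cases h2 : pvIsDR l = true
      · simp [h1, h2, ih]
      · cases fl <;> simp [h1, h2, ih]

theorem pvGoA_eq_goB :
    ∀ n (ls : List String), ls.length ≤ n →
      pvGoA ls false = pvGoB ls ∧ pvGoA ls true = pvGoB (pvSkipB ls) := by
  intro n
  induction n with
  | zero =>
    intro ls h
    have : ls = [] := List.eq_nil_of_length_eq_zero (Nat.le_zero.mp h)
    subst this
    simp [pvGoA, pvGoB, pvSkipB]
  | succ n ih =>
    intro ls h
    cases ls with
    | nil => simp [pvGoA, pvGoB, pvSkipB]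
    | cons l ls =>
      have hlen : ls.length ≤ n := by simpa using h
      have IH1 := (ih ls hlen).1
      have IH2 := (ih ls hlen).2
      by_cases h1 : pvIsCE l = true <;> by_cases h2 : pvIsDR l = true <;>
        exact ⟨by simp [pvGoA, pvGoB, h1, h2, IH1, IH2],
               by simp [pvGoA, pvGoB, pvSkipB, h1, h2, IH1, IH2]⟩

-- ===== VERDICT (by name: the statement is the Claim_ definition above) =====
theorem simplify_analyzer_test_spec : Claim_equal_simplify_analyzer_test := by
  intro test_method _
  unfold Spec_simplify_analyzer_test simplify_analyzer_test simplify_analyzer_test_alt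
  simp only
  rw [pvFoldA_eq_goA]
  rw [(pvGoA_eq_goB ((PySem.Str.split? test_method "\n").getD []).length _ le_rfl).1]
  rw [List.nil_append]
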